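-- pv_equiv track=rewrite | github.com/enw860/leetcode | code36.py | validateSubboard
-- ===== SOURCE A (Python) =====
-- from typing import List
--
-- def validateSubboard(subboard: List[str]) -> bool:
--   hashTable = {}
--   for item in subboard:
--     item_key = f"key_{item}"
--     if item_key not in hashTable:
--       hashTable[item_key] = 1
--     else:
--       hashTable[item_key] += 1
--       if item_key != "key_.":
--         return False
--   return True
-- ===== SOURCE B (Python) =====
-- def validateSubboard(subboard):
--     cells = sorted(item for item in subboard if item != '.')
--     return all(cells[i] != cells[i + 1] for i in range(len(cells) - 1))
-- ===== Notes on version B (the rewrite author's own statement) =====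
-- stated objective: alternative
-- what changed: Replaces A's incremental hash-counter loop with early exit by the sort-based duplicate check: sort the non-'.' entries and verify no two adjacent sorted entries are equal.
import Mathlib
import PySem

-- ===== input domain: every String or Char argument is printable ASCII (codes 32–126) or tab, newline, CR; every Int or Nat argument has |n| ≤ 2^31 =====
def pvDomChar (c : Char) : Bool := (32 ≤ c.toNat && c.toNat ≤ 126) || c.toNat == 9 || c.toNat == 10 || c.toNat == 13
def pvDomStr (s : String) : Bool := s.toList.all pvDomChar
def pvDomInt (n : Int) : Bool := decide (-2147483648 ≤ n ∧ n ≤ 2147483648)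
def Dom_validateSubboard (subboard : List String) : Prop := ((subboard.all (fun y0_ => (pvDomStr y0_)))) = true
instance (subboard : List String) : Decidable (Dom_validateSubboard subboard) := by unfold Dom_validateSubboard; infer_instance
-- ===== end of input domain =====

-- B replaces A's incremental hash-counter loop (with early exit) by the sort-based
-- duplicate check: sort the non-'.' entries and verify no two adjacent entries are equal.


-- ===== PORT A =====
def vsbLoop (d : PySem.Dict String Int) : List String → Bool
  | [] => true
  | item :: rest =>
    if !(d.contains ("key_" ++ item)) then
      vsbLoop (d.insert ("key_" ++ item) 1) rest
    else
      if ("key_" ++ item) ≠ "key_." then false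
      else vsbLoop (d.modify ("key_" ++ item) 0 (· + 1)) rest

def validateSubboard (subboard : List String) : Bool :=
  vsbLoop PySem.Dict.empty subboard

-- ===== PORT B =====
-- all(cells[i] != cells[i+1] for i in range(len(cells)-1)): adjacent-pair scan
def vsbAdj : List String → Bool
  | [] => true
  | [_] => true
  | a :: b :: r => (a != b) && vsbAdj (b :: r)

def validateSubboard_alt (subboard : List String) : Bool :=
  let cells := PySem.List.sorted (subboard.filter (fun item => item != ".")) (fun x => x) false
  vsbAdj cells

-- ===== PRECONDITION & SPEC =====
def Spec_validateSubboard (subboard : List String) (out : Bool) : Prop := out = validateSubboard_alt subboard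
instance (subboard : List String) (out : Bool) : Decidable (Spec_validateSubboard subboard out) := by unfold Spec_validateSubboard; infer_instance

-- ===== CLAIM (what is proved, stated in full; the proofs are below) =====
def Claim_equal_validateSubboard : Prop := ∀ (subboard : List String), Dom_validateSubboard subboard → Spec_validateSubboard subboard (validateSubboard subboard)

-- ===== LEMMAS AND PROOFS =====

theorem vsb_key_inj (x y : String) (h : "key_" ++ x = "key_" ++ y) : x = y := by
  have h2 := congrArg String.toList h
  simp [String.toList_append] at h2
  exact String.toList_inj.mp h2

theorem vsb_key_dot : ("key_" ++ "." : String) = "key_." := rfl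

theorem vsb_mem_keys_modify {ν : Type} (d : PySem.Dict String ν) (k y : String) (d0 : ν)
    (f : ν → ν) : y ∈ (d.modify k d0 f).keys ↔ y = k ∨ y ∈ d.keys := by
  rw [PySem.Dict.keys_modify]
  exact PySem.Dict.mem_keys_insert _ _ _ _

-- On a ≤-sorted list, the adjacent-distinct scan decides Nodup.
theorem vsbAdj_iff_nodup : ∀ (l : List String), l.Pairwise (· ≤ ·) →
    (vsbAdj l = true ↔ l.Nodup) := by
  intro l
  induction l with
  | nil => intro _; simp [vsbAdj]
  | cons a t ih =>
    intro h
    cases t with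
    | nil => simp [vsbAdj]
    | cons b r =>
      have hab : a ≤ b := (List.pairwise_cons.mp h).1 b List.mem_cons_self
      have ht : (b :: r).Pairwise (· ≤ ·) := (List.pairwise_cons.mp h).2
      have hbr : ∀ x ∈ r, b ≤ x := fun x hx => (List.pairwise_cons.mp ht).1 x hx
      rw [show vsbAdj (a :: b :: r) = ((a != b) && vsbAdj (b :: r)) from rfl]
      rw [Bool.and_eq_true, bne_iff_ne, ih ht]
      rw [show (a :: b :: r).Nodup ↔ a ∉ b :: r ∧ (b :: r).Nodup from List.nodup_cons]
      constructor
      · rintro ⟨hne, hnd⟩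
        refine ⟨?_, hnd⟩
        intro hmem
        rcases List.mem_cons.mp hmem with h' | h'
        · exact hne h'
        · have hlt : a < b := lt_of_le_of_ne hab hne
          exact absurd (lt_of_lt_of_le hlt (hbr a h')) (lt_irrefl a)
      · rintro ⟨hnm, hnd⟩
        exact ⟨fun h' => hnm (h' ▸ List.mem_cons_self), hnd⟩

theorem vsb_loop_iff (xs : List String) : ∀ (d : PySem.Dict String Int),
    (vsbLoop d xs = true ↔
      ((xs.filter (fun x => x != ".")).Nodup ∧
        ∀ x ∈ xs, x ≠ "." → ("key_" ++ x) ∉ d.keys)) := by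
  induction xs with
  | nil => intro d; simp [vsbLoop]
  | cons x rest ih =>
    intro d
    by_cases hc : d.contains ("key_" ++ x) = true
    · by_cases hx : x = "."
      · subst hx
        have hc2 : d.contains "key_." = true := hc
        rw [show vsbLoop d ("." :: rest) = vsbLoop (d.modify ("key_" ++ ".") 0 (· + 1)) rest
            from by simp [vsbLoop, hc2]]
        rw [ih]
        have hfil : List.filter (fun z => z != ".") ("." :: rest) =
            List.filter (fun z => z != ".") rest := by simp
        have hmk : ∀ y : String, y ≠ "." →
            (("key_" ++ y) ∈ (d.modify ("key_" ++ ".") 0 (· + 1)).keys ↔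
              ("key_" ++ y) ∈ d.keys) := by
          intro y hyne
          rw [vsb_mem_keys_modify]
          constructor
          · rintro (h | h)
            · exact absurd (vsb_key_inj y "." (by rw [h, vsb_key_dot])) hyne
            · exact h
          · exact Or.inr
        constructor
        · rintro ⟨h1, h2⟩
          rw [hfil]
          refine ⟨h1, ?_⟩
          intro y hy hyne
          rcases List.mem_cons.mp hy with hy' | hy'
          · exact absurd hy' hyne
          · intro hk
            exact h2 y hy' hyne ((hmk y hyne).mpr hk)
        · rintro ⟨h1, h2⟩
          rw [hfil] at h1
          refine ⟨h1, ?_⟩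
          intro y hy hyne hk
          exact h2 y (List.mem_cons_of_mem _ hy) hyne ((hmk y hyne).mp hk)
      · have hkey : ("key_" ++ x ≠ "key_.") := fun h =>
          hx (vsb_key_inj x "." (by rw [h, vsb_key_dot]))
        rw [show vsbLoop d (x :: rest) = false from by simp [vsbLoop, hc, hkey]]
        constructor
        · intro h; exact absurd h (by simp)
        · rintro ⟨-, h2⟩
          exact absurd ((PySem.Dict.contains_iff_mem_keys d _).mp hc)
            (h2 x List.mem_cons_self hx)
    · have hc' : d.contains ("key_" ++ x) = false := Bool.eq_false_iff.mpr hc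
      have hnk : ("key_" ++ x) ∉ d.keys := fun h =>
        hc ((PySem.Dict.contains_iff_mem_keys d _).mpr h)
      rw [show vsbLoop d (x :: rest) = vsbLoop (d.insert ("key_" ++ x) 1) rest
          from by simp [vsbLoop, hc']]
      rw [ih]
      have hmki : ∀ y : String,
          (("key_" ++ y) ∈ (d.insert ("key_" ++ x) 1).keys ↔
            y = x ∨ ("key_" ++ y) ∈ d.keys) := by
        intro y
        rw [PySem.Dict.mem_keys_insert]
        constructor
        · rintro (h | h)
          · exact Or.inl (vsb_key_inj y x h)
          · exact Or.inr h
        · rintro (h | h)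
          · exact Or.inl (by rw [h])
          · exact Or.inr h
      by_cases hx : x = "."
      · subst hx
        have hfil : List.filter (fun z => z != ".") ("." :: rest) =
            List.filter (fun z => z != ".") rest := by simp
        rw [hfil]
        constructor
        · rintro ⟨h1, h2⟩
          refine ⟨h1, ?_⟩
          intro y hy hyne
          rcases List.mem_cons.mp hy with hy' | hy'
          · exact absurd hy' hyne
          · intro hk
            exact h2 y hy' hyne ((hmki y).mpr (Or.inr hk))
        · rintro ⟨h1, h2⟩
          refine ⟨h1, ?_⟩
          intro y hy hyne hk
          rcases (hmki y).mp hk with h | h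
          · exact hyne h
          · exact h2 y (List.mem_cons_of_mem _ hy) hyne h
      · have hfil : List.filter (fun z => z != ".") (x :: rest) =
            x :: List.filter (fun z => z != ".") rest :=
          List.filter_cons_of_pos (by simpa using hx)
        rw [hfil, List.nodup_cons]
        constructor
        · rintro ⟨h1, h2⟩
          refine ⟨⟨?_, h1⟩, ?_⟩
          · intro hmemf
            have hxr : x ∈ rest := (List.mem_filter.mp hmemf).1
            exact (h2 x hxr hx) ((hmki x).mpr (Or.inl rfl))
          · intro y hy hyne
            rcases List.mem_cons.mp hy with hy' | hy'
            · subst hy'; exact hnk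
            · intro hk
              exact h2 y hy' hyne ((hmki y).mpr (Or.inr hk))
        · rintro ⟨⟨hxf, h1⟩, h2⟩
          refine ⟨h1, ?_⟩
          intro y hy hyne hk
          rcases (hmki y).mp hk with h | h
          · subst h
            exact hxf (List.mem_filter.mpr ⟨hy, by simpa using hyne⟩)
          · exact h2 y (List.mem_cons_of_mem _ hy) hyne h

-- ===== VERDICT (by name: the statement is the Claim_ definition above) =====
theorem validateSubboard_spec : Claim_equal_validateSubboard := by
  intro subboard _
  unfold Spec_validateSubboard validateSubboard validateSubboard_alt
  have hA := vsb_loop_iff subboard PySem.Dict.empty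
  simp only [PySem.Dict.keys_empty, List.not_mem_nil, not_false_iff] at hA
  have hA' : vsbLoop PySem.Dict.empty subboard = true ↔
      (subboard.filter (fun x => x != ".")).Nodup := by
    rw [hA]; simp
  set f := subboard.filter (fun x => x != ".") with hf
  have hperm := PySem.List.sorted_perm f (fun x => x) false
  have hpw := PySem.List.sorted_pairwise f (fun x => x)
  have hB : vsbAdj (PySem.List.sorted f (fun x => x) false) = true ↔ f.Nodup := by
    rw [vsbAdj_iff_nodup _ hpw]
    exact hperm.nodup_iff
  rw [Bool.eq_iff_iff, hA']
  exact hB.symm
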